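-- pv_equiv track=rewrite | github.com/ElchaabiMohamed/InferCode_SVM | NC-5690-python-files/program_3010.py | sousChaine
-- ===== SOURCE A (Python) =====
-- def sousChaine(s1,s2):
--   Trouve=False
--   i=0
--   if s1=='':
--     Trouve=True
--   while i<len(s1) and i<len(s2):
--     ok=False
--     if s1 in s2:
--       Trouve=True
--     i=i+1
--   return Trouve
-- ===== SOURCE B (Python) =====
-- def sousChaine(s1, s2):
--     n = len(s1)
--     m = len(s2)
--     for i in range(m - n + 1):
--         if s2[i:i+n] == s1:
--             return True
--     return False
-- ===== Notes on version B (the rewrite author's own statement) =====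
-- stated objective: faster
-- what changed: Replaces A's while-loop that re-runs the builtin 'in' substring test min(len(s1),len(s2)) times with a single explicit naive positional scan comparing the slice s2[i:i+n] to s1, returning on the first match.
import Mathlib
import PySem

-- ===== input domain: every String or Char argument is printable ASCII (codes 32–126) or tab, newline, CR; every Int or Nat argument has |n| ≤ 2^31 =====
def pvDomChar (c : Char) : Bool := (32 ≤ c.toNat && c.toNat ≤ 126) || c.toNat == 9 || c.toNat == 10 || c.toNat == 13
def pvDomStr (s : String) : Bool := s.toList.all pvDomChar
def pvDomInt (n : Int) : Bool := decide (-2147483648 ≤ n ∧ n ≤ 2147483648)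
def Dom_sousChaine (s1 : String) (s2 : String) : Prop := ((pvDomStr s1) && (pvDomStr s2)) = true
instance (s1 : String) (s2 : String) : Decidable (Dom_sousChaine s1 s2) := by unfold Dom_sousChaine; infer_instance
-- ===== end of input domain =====

-- B replaces A's redundant while-loop around the builtin `in` test by an explicit
-- naive positional scan comparing the slice s2[i:i+n] to s1 (alternative decomposition).


-- ===== PORT A =====
-- while i < len(s1) and i < len(s2): re-test `s1 in s2`; transliterated as a fold
-- over the loop counter's range (the loop body never reads i except to increment it).
def sousChaine (s1 : String) (s2 : String) : Bool :=
  let trouve0 : Bool := if s1.toList == [] then true else false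
  (List.range (min s1.toList.length s2.toList.length)).foldl
    (fun tr _ => if PySem.Str.isIn s1 s2 then true else tr) trouve0

-- ===== PORT B =====
def sousChaine_alt (s1 : String) (s2 : String) : Bool :=
  let l1 := s1.toList
  let l2 := s2.toList
  (PySem.List.pyRange 0 ((l2.length : Int) - (l1.length : Int) + 1) 1).any
    (fun i => PySem.List.slice l2 (some i) (some (i + (l1.length : Int))) == l1)

-- ===== PRECONDITION & SPEC =====
def Spec_sousChaine (s1 : String) (s2 : String) (out : Bool) : Prop := out = sousChaine_alt s1 s2
instance (s1 : String) (s2 : String) (out : Bool) : Decidable (Spec_sousChaine s1 s2 out) := by unfold Spec_sousChaine; infer_instance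

-- ===== CLAIM (what is proved, stated in full; the proofs are below) =====
def Claim_equal_sousChaine : Prop := ∀ (s1 : String) (s2 : String), Dom_sousChaine s1 s2 → Spec_sousChaine s1 s2 (sousChaine s1 s2)

-- ===== LEMMAS AND PROOFS =====

-- A's loop body is constant in the counter: the fold is init ∨ (c ∧ the range is nonempty)
lemma foldA_const (c : Bool) (init : Bool) (l : List Nat) :
    l.foldl (fun tr _ => if c then true else tr) init = (init || (c && !l.isEmpty)) := by
  induction l generalizing init with
  | nil => simp
  | cons a t ih => cases c <;> simp_all

lemma portA_eq_isIn (s1 s2 : String) :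
    sousChaine s1 s2 = PySem.Chars.isIn s1.toList s2.toList := by
  unfold sousChaine
  rw [foldA_const]
  rcases h1 : s1.toList with _ | ⟨a, t⟩
  · simp [h1, PySem.Chars.isIn_nil]
  · rcases h2 : s2.toList with _ | ⟨b, u⟩
    · have hf : PySem.Chars.isIn (a :: t) ([] : List Char) = false := by
        rw [PySem.Chars.isIn_eq_false_iff]
        intro hinf
        have := hinf.length_le
        simp at this
      simp [h1, h2, hf]
    · simp [h1, h2, Nat.succ_min_succ, List.range_succ_eq_map]

lemma portB_eq_isIn (s1 s2 : String) :
    sousChaine_alt s1 s2 = PySem.Chars.isIn s1.toList s2.toList := by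
  unfold sousChaine_alt
  rw [Bool.eq_iff_iff, List.any_eq_true, PySem.Chars.isIn_iff_infix]
  constructor
  · rintro ⟨i, hi, hslice⟩
    rw [PySem.List.mem_pyRange_one] at hi
    obtain ⟨hi0, _⟩ := hi
    obtain ⟨j, rfl⟩ := Int.eq_ofNat_of_zero_le hi0
    rw [PySem.List.slice_natCast_add, beq_iff_eq] at hslice
    exact (hslice ▸ (List.take_prefix _ _)).isInfix.trans (List.drop_suffix j s2.toList).isInfix
  · rintro ⟨pre, suf, heq⟩
    refine ⟨(pre.length : Int), ?_, ?_⟩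
    · rw [PySem.List.mem_pyRange_one]
      have : pre.length + s1.toList.length + suf.length = s2.toList.length := by
        rw [← heq]; simp; omega
      constructor <;> [positivity; (push_cast; omega)]
    · rw [PySem.List.slice_natCast_add, beq_iff_eq, ← heq]
      simp

-- ===== VERDICT (by name: the statement is the Claim_ definition above) =====
theorem sousChaine_spec : Claim_equal_sousChaine := by
  intro s1 s2 _
  unfold Spec_sousChaine
  rw [portA_eq_isIn, portB_eq_isIn]
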